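-- pv_equiv track=rewrite | github.com/vigi30/Clinical-GAN | process_data.py | resetIntegerOutput
-- ===== SOURCE A (Python) =====
-- def resetIntegerOutput(updSeqs,isall =1):
--     # updating the output codes to reduce hypothesis space as some of the medical codes have been removed.
--
--     # outTypes = {prev-codes : new-codes} ,  token codes remain same
--     updPair = []
--     outTypes = {}
--     outTypes.update({0:0 , 1:1,  2:2, 3:3})
--     for i,pair in enumerate(updSeqs):
--         newVisit = []
--         for code in pair[1]:
--             if code in outTypes:
--                 newVisit.append(outTypes[code])
--             else:
--                 outTypes[code] = len(outTypes)
--                 newVisit.append(outTypes[code])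
--         updPair.append((pair[0],newVisit))
--     return updPair,outTypes
-- ===== SOURCE B (Python) =====
-- def resetIntegerOutput(updSeqs, isall=1):
--     # Pass 1: build the complete code vocabulary in first-appearance order.
--     outTypes = {0: 0, 1: 1, 2: 2, 3: 3}
--     for pair in updSeqs:
--         for code in pair[1]:
--             if code not in outTypes:
--                 outTypes[code] = len(outTypes)
--     # Pass 2: encode every visit with the finished dictionary.
--     updPair = [(pair[0], [outTypes[code] for code in pair[1]]) for pair in updSeqs]
--     return updPair, outTypes
-- ===== Notes on version B (the rewrite author's own statement) =====
-- stated objective: alternative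
-- what changed: A interleaves vocabulary building and encoding in one pass with mutable loop state; B first builds the complete first-appearance vocabulary over all sequences, then encodes every sequence by pure lookup in the finished dict (build-then-encode, two separate passes).
import Mathlib
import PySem

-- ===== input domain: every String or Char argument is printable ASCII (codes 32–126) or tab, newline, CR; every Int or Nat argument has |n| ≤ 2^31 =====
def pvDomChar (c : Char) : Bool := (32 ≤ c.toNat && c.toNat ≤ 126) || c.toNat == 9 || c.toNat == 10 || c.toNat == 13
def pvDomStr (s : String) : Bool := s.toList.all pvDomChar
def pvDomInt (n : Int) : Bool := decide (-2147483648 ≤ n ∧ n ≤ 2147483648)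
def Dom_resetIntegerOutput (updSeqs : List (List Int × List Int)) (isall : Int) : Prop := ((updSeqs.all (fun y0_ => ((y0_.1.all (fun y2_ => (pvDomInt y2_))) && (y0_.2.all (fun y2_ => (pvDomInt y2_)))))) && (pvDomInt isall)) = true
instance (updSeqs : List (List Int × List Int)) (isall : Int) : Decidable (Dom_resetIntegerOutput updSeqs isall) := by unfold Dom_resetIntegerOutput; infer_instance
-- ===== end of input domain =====

-- B differs from A only in decomposition: A interleaves vocabulary building and encoding in
-- one pass; B builds the complete vocabulary first, then encodes with the finished dict.

-- ===== PORT A =====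
-- the seed dict {0:0, 1:1, 2:2, 3:3}
def pvSeed : PySem.Dict Int Int :=
  (((PySem.Dict.empty.insert 0 0).insert 1 1).insert 2 2).insert 3 3

-- body of A's inner loop: 'if code in outTypes: … else: outTypes[code] = len(outTypes); …'
def pvStepA (st : List Int × PySem.Dict Int Int) (code : Int) :
    List Int × PySem.Dict Int Int :=
  if st.2.contains code then
    (st.1 ++ [st.2.getD code 0], st.2)
  else
    let d' := st.2.insert code (st.2.size : Int)
    (st.1 ++ [d'.getD code 0], d')

-- inner loop of A: 'for code in pair[1]: …' carrying (newVisit, outTypes)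
def pvInnerA (codes : List Int) (st : List Int × PySem.Dict Int Int) :
    List Int × PySem.Dict Int Int :=
  codes.foldl pvStepA st

-- body of A's outer loop
def pvOuterStepA (st : List (List Int × List Int) × PySem.Dict Int Int)
    (pair : List Int × List Int) : List (List Int × List Int) × PySem.Dict Int Int :=
  let inner := pvInnerA pair.2 ([], st.2)
  (st.1 ++ [(pair.1, inner.1)], inner.2)

-- port of A, the given Python (one interleaved pass)
def resetIntegerOutput (updSeqs : List (List Int × List Int)) (isall : Int) :
    (List (List Int × List Int)) × (List (Int × Int)) :=
  let st := updSeqs.foldl pvOuterStepA (([] : List (List Int × List Int)), pvSeed)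
  (st.1, st.2.items)

-- ===== PORT B =====
-- body of B's pass-1 inner loop: 'if code not in outTypes: outTypes[code] = len(outTypes)'
def pvStepB (d : PySem.Dict Int Int) (code : Int) : PySem.Dict Int Int :=
  if d.contains code then d else d.insert code (d.size : Int)

-- pass 1 of B over one visit
def pvBuildVisit (codes : List Int) (d : PySem.Dict Int Int) : PySem.Dict Int Int :=
  codes.foldl pvStepB d

-- pass 1 of B over all sequences
def pvBuild (updSeqs : List (List Int × List Int)) (d : PySem.Dict Int Int) :
    PySem.Dict Int Int :=
  updSeqs.foldl (fun d pair => pvBuildVisit pair.2 d) d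

-- port of B (build the vocabulary, then encode)
def resetIntegerOutput_alt (updSeqs : List (List Int × List Int)) (isall : Int) :
    (List (List Int × List Int)) × (List (Int × Int)) :=
  let outTypes := pvBuild updSeqs pvSeed
  (updSeqs.map (fun pair => (pair.1, pair.2.map (fun code => outTypes.getD code 0))),
   outTypes.items)

-- ===== PRECONDITION & SPEC =====
def Spec_resetIntegerOutput (updSeqs : List (List Int × List Int)) (isall : Int) (out : (List (List Int × List Int)) × (List (Int × Int))) : Prop := out = resetIntegerOutput_alt updSeqs isall
instance (updSeqs : List (List Int × List Int)) (isall : Int) (out : (List (List Int × List Int)) × (List (Int × Int))) : Decidable (Spec_resetIntegerOutput updSeqs isall out) := by unfold Spec_resetIntegerOutput; infer_instance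

-- ===== CLAIM (what is proved, stated in full; the proofs are below) =====
def Claim_equal_resetIntegerOutput : Prop := ∀ (updSeqs : List (List Int × List Int)) (isall : Int), Dom_resetIntegerOutput updSeqs isall → Spec_resetIntegerOutput updSeqs isall (resetIntegerOutput updSeqs isall)

-- ===== LEMMAS AND PROOFS =====

-- 'D extends d': every binding of d is still a binding of D
def pvExt (d D : PySem.Dict Int Int) : Prop :=
  ∀ k v, d.get? k = some v → D.get? k = some v

theorem pvExt_refl (d : PySem.Dict Int Int) : pvExt d d := fun _ _ h => h

theorem pvExt_trans {a b c : PySem.Dict Int Int} (h1 : pvExt a b) (h2 : pvExt b c) :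
    pvExt a c := fun k v h => h2 k v (h1 k v h)

-- one B-step only adds bindings
theorem pvExt_stepB (d : PySem.Dict Int Int) (c : Int) : pvExt d (pvStepB d c) := by
  intro k v h
  unfold pvStepB
  split
  · exact h
  · next hc =>
    rw [PySem.Dict.get?_insert]
    split
    · next he =>
      subst he
      rw [PySem.Dict.contains_eq_isSome_get?, h] at hc
      simp at hc
    · exact h

theorem pvExt_buildVisit (codes : List Int) (d : PySem.Dict Int Int) :
    pvExt d (pvBuildVisit codes d) := by
  induction codes generalizing d with
  | nil => exact pvExt_refl d
  | cons c cs ih =>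
    exact pvExt_trans (pvExt_stepB d c) (ih (pvStepB d c))

theorem pvExt_build (seqs : List (List Int × List Int)) (d : PySem.Dict Int Int) :
    pvExt d (pvBuild seqs d) := by
  induction seqs generalizing d with
  | nil => exact pvExt_refl d
  | cons p ps ih =>
    exact pvExt_trans (pvExt_buildVisit p.2 d) (ih _)

-- A's inner loop produces the same dict as B's pass-1 step over the same visit
theorem pvInnerA_snd (codes : List Int) (nv : List Int) (d : PySem.Dict Int Int) :
    (pvInnerA codes (nv, d)).2 = pvBuildVisit codes d := by
  induction codes generalizing nv d with
  | nil => rfl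
  | cons c cs ih =>
    show (pvInnerA cs (pvStepA (nv, d) c)).2 = pvBuildVisit cs (pvStepB d c)
    by_cases hc : d.contains c
    · rw [show pvStepA (nv, d) c = (nv ++ [d.getD c 0], d) by simp [pvStepA, hc],
          show pvStepB d c = d by simp [pvStepB, hc]]
      exact ih _ d
    · rw [show pvStepA (nv, d) c
            = (nv ++ [(d.insert c (d.size : Int)).getD c 0], d.insert c (d.size : Int)) by
              simp [pvStepA, hc],
          show pvStepB d c = d.insert c (d.size : Int) by simp [pvStepB, hc]]
      exact ih _ _

-- A's inner loop appends exactly the lookups in any dict extending its own final dict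
theorem pvInnerA_fst (codes : List Int) (nv : List Int) (d D : PySem.Dict Int Int)
    (hext : pvExt (pvBuildVisit codes d) D) :
    (pvInnerA codes (nv, d)).1 = nv ++ codes.map (fun c => D.getD c 0) := by
  induction codes generalizing nv d with
  | nil => simp [pvInnerA]
  | cons c cs ih =>
    have hstep : pvBuildVisit (c :: cs) d = pvBuildVisit cs (pvStepB d c) := rfl
    rw [hstep] at hext
    show (pvInnerA cs (pvStepA (nv, d) c)).1 = nv ++ (fun c => D.getD c 0) c
        :: cs.map (fun c => D.getD c 0)
    by_cases hc : d.contains c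
    · rw [show pvStepA (nv, d) c = (nv ++ [d.getD c 0], d) by simp [pvStepA, hc],
          show pvStepB d c = d by simp [pvStepB, hc]] at *
      -- d.getD c 0 = D.getD c 0 since c is bound in d and D extends pvBuildVisit cs d ⊇ d
      obtain ⟨v, hv⟩ : ∃ v, d.get? c = some v := by
        rw [PySem.Dict.contains_eq_isSome_get?] at hc
        exact Option.isSome_iff_exists.mp hc
      have hD : D.get? c = some v := hext c v (pvExt_buildVisit cs d c v hv)
      rw [ih (nv ++ [d.getD c 0]) d hext]
      simp [PySem.Dict.getD_eq_get?_getD, hv, hD]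
    · rw [show pvStepA (nv, d) c
            = (nv ++ [(d.insert c (d.size : Int)).getD c 0], d.insert c (d.size : Int)) by
              simp [pvStepA, hc],
          show pvStepB d c = d.insert c (d.size : Int) by simp [pvStepB, hc]] at *
      have hv : (d.insert c (d.size : Int)).get? c = some (d.size : Int) :=
        PySem.Dict.get?_insert_self d c _
      have hD : D.get? c = some (d.size : Int) :=
        hext c _ (pvExt_buildVisit cs _ c _ hv)
      rw [ih _ _ hext]
      simp [PySem.Dict.getD_eq_get?_getD, hv, hD]

-- one outer A-step, with the inner dict rewritten via pvInnerA_snd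
theorem pvOuterStepA_eq (acc : List (List Int × List Int)) (d : PySem.Dict Int Int)
    (p : List Int × List Int) :
    pvOuterStepA (acc, d) p
      = (acc ++ [(p.1, (pvInnerA p.2 ([], d)).1)], pvBuildVisit p.2 d) := by
  show (acc ++ [(p.1, (pvInnerA p.2 ([], d)).1)], (pvInnerA p.2 ([], d)).2) = _
  rw [pvInnerA_snd]

-- A's outer loop: dict equals B's pass 1; list equals B's pass 2 under any extension
theorem pvOuterA_snd (seqs : List (List Int × List Int))
    (acc : List (List Int × List Int)) (d : PySem.Dict Int Int) :
    (seqs.foldl pvOuterStepA (acc, d)).2 = pvBuild seqs d := by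
  induction seqs generalizing acc d with
  | nil => rfl
  | cons p ps ih =>
    show (ps.foldl pvOuterStepA (pvOuterStepA (acc, d) p)).2 = pvBuild ps (pvBuildVisit p.2 d)
    rw [pvOuterStepA_eq]
    exact ih _ _

theorem pvOuterA_fst (seqs : List (List Int × List Int))
    (acc : List (List Int × List Int)) (d D : PySem.Dict Int Int)
    (hext : pvExt (pvBuild seqs d) D) :
    (seqs.foldl pvOuterStepA (acc, d)).1
      = acc ++ seqs.map (fun p => (p.1, p.2.map (fun c => D.getD c 0))) := by
  induction seqs generalizing acc d with
  | nil => simp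
  | cons p ps ih =>
    have hstep : pvBuild (p :: ps) d = pvBuild ps (pvBuildVisit p.2 d) := rfl
    rw [hstep] at hext
    show (ps.foldl pvOuterStepA (pvOuterStepA (acc, d) p)).1 = _
    rw [pvOuterStepA_eq]
    have hv : (pvInnerA p.2 ([], d)).1 = [] ++ p.2.map (fun c => D.getD c 0) :=
      pvInnerA_fst p.2 [] d D (pvExt_trans (pvExt_build ps _) hext)
    rw [ih _ _ hext, hv]
    simp

-- ===== VERDICT (by name: the statement is the Claim_ definition above) =====
theorem resetIntegerOutput_spec : Claim_equal_resetIntegerOutput := by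
  intro updSeqs isall _
  unfold Spec_resetIntegerOutput resetIntegerOutput resetIntegerOutput_alt
  refine Prod.ext ?_ ?_
  · exact pvOuterA_fst updSeqs [] pvSeed (pvBuild updSeqs pvSeed)
      (pvExt_refl _)
  · simp only
    rw [pvOuterA_snd]
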